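-- pv_equiv track=rewrite | github.com/wso2-incubator/BACE | src/common/sandbox.py | _clean_error_details
-- ===== SOURCE A (Python) =====
-- def _clean_error_details(raw_details: str) -> str:
--     """
--     Extract only the relevant assertion line and error message from traceback.
--
--     Args:
--         raw_details: Raw traceback string
--
--     Returns:
--         Cleaned error details with just the assertion and error message
--     """
--     if not raw_details:
--         return ""
--
--     lines = raw_details.strip().split("\n")
--
--     # Find the assertion line and error message
--     assertion_line = ""
--     error_message = ""
--
--     for i, line in enumerate(lines):
--         # Look for assertion lines (indented and contain self.assert)
--         if line.strip().startswith("self.assert") or "~~~" in line: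
--             # Get the actual assertion (previous line if current is ~~~)
--             if "~~~" in line and i > 0:
--                 assertion_line = lines[i - 1].strip()
--             elif line.strip().startswith("self.assert"):
--                 assertion_line = line.strip()
--
--         # Look for error messages (AssertionError, ValueError, etc.)
--         elif any(
--             error_type in line
--             for error_type in [
--                 "AssertionError:",
--                 "ValueError:",
--                 "TypeError:",
--                 "IndexError:",
--                 "KeyError:",
--                 "AttributeError:",
--             ]
--         ):
--             error_message = line.strip()
--
--     # Combine assertion and error message
--     result_parts = []
--     if assertion_line:
--         result_parts.append(assertion_line)
--     if error_message:
--         result_parts.append(error_message)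
--
--     return "\n".join(result_parts) if result_parts else raw_details
-- ===== SOURCE B (Python) =====
-- _ERROR_MARKERS = (
--     "AssertionError:",
--     "ValueError:",
--     "TypeError:",
--     "IndexError:",
--     "KeyError:",
--     "AttributeError:",
-- )
--
--
-- def _is_assertionish(line):
--     return line.strip().startswith("self.assert") or "~~~" in line
--
--
-- def _last_assertion(lines):
--     """Last assertion candidate: a line before a ~~~ marker, or a self.assert line."""
--     candidates = []
--     prev = None
--     for line in lines:
--         if "~~~" in line and prev is not None:
--             candidates.append(prev.strip())
--         elif line.strip().startswith("self.assert"):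
--             candidates.append(line.strip())
--         prev = line
--     return candidates[-1] if candidates else ""
--
--
-- def _last_error(lines):
--     """Last error-marker line among the lines not claimed by the assertion scan."""
--     candidates = [
--         line.strip()
--         for line in lines
--         if not _is_assertionish(line)
--         and any(marker in line for marker in _ERROR_MARKERS)
--     ]
--     return candidates[-1] if candidates else ""
--
--
-- def _clean_error_details(raw_details: str) -> str:
--     if not raw_details:
--         return ""
--     lines = raw_details.strip().split("\n")
--     parts = [part for part in (_last_assertion(lines), _last_error(lines)) if part]
--     return "\n".join(parts) if parts else raw_details
-- ===== Notes on version B (the rewrite author's own statement) =====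
-- stated objective: alternative
-- what changed: Replaces A's single index-driven loop (pair state, elif chain, lines[i-1] lookup) with two independent passes factored into named helpers: a previous-line-carrying scan that collects assertion candidates and a comprehension collecting error-marker lines not claimed by the assertion predicate, each taking its last candidate.
import Mathlib
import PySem

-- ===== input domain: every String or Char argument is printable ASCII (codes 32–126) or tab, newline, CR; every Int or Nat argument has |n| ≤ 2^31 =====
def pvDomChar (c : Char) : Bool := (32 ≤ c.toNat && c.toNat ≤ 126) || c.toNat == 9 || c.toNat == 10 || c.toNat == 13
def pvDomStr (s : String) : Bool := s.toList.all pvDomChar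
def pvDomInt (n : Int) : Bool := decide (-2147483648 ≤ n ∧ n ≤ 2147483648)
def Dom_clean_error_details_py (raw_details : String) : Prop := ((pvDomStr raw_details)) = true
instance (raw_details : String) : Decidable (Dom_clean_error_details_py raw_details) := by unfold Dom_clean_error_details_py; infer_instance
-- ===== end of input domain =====

-- B replaces A's single index-driven loop with two independent passes (a previous-line-carrying
-- assertion scan and a filtered error-marker scan), each keeping its last candidate; alternative
-- decomposition, same cost.


-- ===== PORT A =====
def pvMarkersA : List String :=
  ["AssertionError:", "ValueError:", "TypeError:", "IndexError:", "KeyError:", "AttributeError:"]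

def clean_error_details_py (raw_details : String) : String :=
  if raw_details == "" then ""
  else
    let lines := (PySem.Str.split? (PySem.Str.strip raw_details) "\n").getD []
    let st := (PySem.List.enumerate lines 0).foldl
      (fun (st : String × String) (p : Int × String) =>
        if PySem.Str.startswith (PySem.Str.strip p.2) "self.assert" || PySem.Str.isIn "~~~" p.2 then
          if PySem.Str.isIn "~~~" p.2 && decide (0 < p.1) then
            -- i > 0 here, so lines[i-1] never raises; getD "" is exact
            (PySem.Str.strip ((PySem.List.pyGet? lines (p.1 - 1)).getD ""), st.2)
          else if PySem.Str.startswith (PySem.Str.strip p.2) "self.assert" then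
            (PySem.Str.strip p.2, st.2)
          else st
        else if pvMarkersA.any (fun m => PySem.Str.isIn m p.2) then
          (st.1, PySem.Str.strip p.2)
        else st)
      ("", "")
    let result_parts : List String := []
    let result_parts := if st.1 != "" then result_parts ++ [st.1] else result_parts
    let result_parts := if st.2 != "" then result_parts ++ [st.2] else result_parts
    if result_parts != [] then PySem.Str.join "\n" result_parts else raw_details

-- ===== PORT B =====
def pvErrorMarkers : List String :=
  ["AssertionError:", "ValueError:", "TypeError:", "IndexError:", "KeyError:", "AttributeError:"]

def pvIsAssertionish (line : String) : Bool :=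
  PySem.Str.startswith (PySem.Str.strip line) "self.assert" || PySem.Str.isIn "~~~" line

def pvLastAssertion (lines : List String) : String :=
  match (lines.foldl
    (fun (st : List String × Option String) line =>
      let cands :=
        if PySem.Str.isIn "~~~" line && st.2.isSome then
          st.1 ++ [PySem.Str.strip (st.2.getD "")]
        else if PySem.Str.startswith (PySem.Str.strip line) "self.assert" then
          st.1 ++ [PySem.Str.strip line]
        else st.1
      (cands, some line))
    ([], none)).1.getLast? with
  | some c => c
  | none => ""

def pvLastError (lines : List String) : String :=
  match ((lines.filter
      (fun l => !pvIsAssertionish l && pvErrorMarkers.any (fun m => PySem.Str.isIn m l))).map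
      PySem.Str.strip).getLast? with
  | some c => c
  | none => ""

def clean_error_details_py_alt (raw_details : String) : String :=
  if raw_details == "" then ""
  else
    let lines := (PySem.Str.split? (PySem.Str.strip raw_details) "\n").getD []
    let parts := [pvLastAssertion lines, pvLastError lines].filter (fun p => p != "")
    if parts != [] then PySem.Str.join "\n" parts else raw_details

-- ===== PRECONDITION & SPEC =====
def Spec_clean_error_details_py (raw_details : String) (out : String) : Prop := out = clean_error_details_py_alt raw_details
instance (raw_details : String) (out : String) : Decidable (Spec_clean_error_details_py raw_details out) := by unfold Spec_clean_error_details_py; infer_instance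

-- ===== CLAIM (what is proved, stated in full; the proofs are below) =====
def Claim_equal_clean_error_details_py : Prop := ∀ (raw_details : String), Dom_clean_error_details_py raw_details → Spec_clean_error_details_py raw_details (clean_error_details_py raw_details)

-- ===== LEMMAS AND PROOFS =====

-- A's assertion-branch update, as an optional candidate
def pvCandA (lines : List String) (p : Int × String) : Option String :=
  if PySem.Str.startswith (PySem.Str.strip p.2) "self.assert" || PySem.Str.isIn "~~~" p.2 then
    if PySem.Str.isIn "~~~" p.2 && decide (0 < p.1) then
      some (PySem.Str.strip ((PySem.List.pyGet? lines (p.1 - 1)).getD ""))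
    else if PySem.Str.startswith (PySem.Str.strip p.2) "self.assert" then
      some (PySem.Str.strip p.2)
    else none
  else none

-- A's error-branch update, as an optional candidate
def pvCandE (line : String) : Option String :=
  if !pvIsAssertionish line && pvErrorMarkers.any (fun m => PySem.Str.isIn m line) then
    some (PySem.Str.strip line)
  else none

-- B's assertion candidates, as a previous-line-indexed recursion
def pvCandsFrom : Option String → List String → List String
  | _, [] => []
  | prev, line :: rest =>
    (if PySem.Str.isIn "~~~" line && prev.isSome then
        [PySem.Str.strip (prev.getD "")]
      else if PySem.Str.startswith (PySem.Str.strip line) "self.assert" then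
        [PySem.Str.strip line]
      else []) ++ pvCandsFrom (some line) rest

theorem pvGetLast?_getD_cons {β : Type} (c d : β) (L : List β) :
    ((c :: L).getLast?).getD d = (L.getLast?).getD c := by
  induction L generalizing c d with
  | nil => rfl
  | cons b L ih => rw [List.getLast?_cons_cons, ih b d, ih b c]

-- keep-last loop = last of the candidate list
theorem pvFoldlKeepLast {α β : Type} (cand : α → Option β) (l : List α) (init : β) :
    l.foldl (fun acc x => (cand x).getD acc) init = ((l.filterMap cand).getLast?).getD init := by
  induction l generalizing init with
  | nil => rfl
  | cons x l ih =>
    simp only [List.foldl_cons, List.filterMap_cons]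
    cases h : cand x with
    | none => simp [ih]
    | some c => simp [ih, pvGetLast?_getD_cons]

-- B's candidate-collecting loop builds pvCandsFrom
theorem pvFoldB (ls : List String) (acc : List String) (prev : Option String) :
    (ls.foldl
      (fun (st : List String × Option String) line =>
        let cands :=
          if PySem.Str.isIn "~~~" line && st.2.isSome then
            st.1 ++ [PySem.Str.strip (st.2.getD "")]
          else if PySem.Str.startswith (PySem.Str.strip line) "self.assert" then
            st.1 ++ [PySem.Str.strip line]
          else st.1
        (cands, some line))
      (acc, prev)).1 = acc ++ pvCandsFrom prev ls := by
  induction ls generalizing acc prev with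
  | nil => simp [pvCandsFrom]
  | cons line rest ih =>
    simp only [List.foldl_cons, pvCandsFrom]
    rw [ih]
    split_ifs <;> simp

-- A's indexed candidates over a suffix = B's previous-line candidates
theorem pvEnumCandA (suf pre : List String) :
    (PySem.List.enumerate suf (pre.length : Int)).filterMap (pvCandA (pre ++ suf))
      = pvCandsFrom pre.getLast? suf := by
  induction suf generalizing pre with
  | nil => simp [PySem.List.enumerate_nil, pvCandsFrom]
  | cons line rest ih =>
    rw [PySem.List.enumerate_cons, List.filterMap_cons, pvCandsFrom]
    have hrest : (PySem.List.enumerate rest ((pre.length : Int) + 1)).filterMap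
        (pvCandA (pre ++ line :: rest)) = pvCandsFrom (some line) rest := by
      have := ih (pre ++ [line])
      simpa [List.append_assoc] using this
    have hget : 0 < pre.length →
        PySem.List.pyGet? (pre ++ line :: rest) ((pre.length : Int) - 1) = pre.getLast? := by
      intro hlen
      have h1 : ((pre.length : Int) - 1) = ((pre.length - 1 : Nat) : Int) := by omega
      rw [h1, PySem.List.pyGet?_natCast]
      rw [List.getElem?_append_left (by omega)]
      rw [List.getLast?_eq_getElem?]
    have key : (match pvCandA (pre ++ line :: rest) ((pre.length : Int), line) with
        | none => ([] : List String) | some c => [c])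
        = (if PySem.Str.isIn "~~~" line && pre.getLast?.isSome then
            [PySem.Str.strip (pre.getLast?.getD "")]
          else if PySem.Str.startswith (PySem.Str.strip line) "self.assert" then
            [PySem.Str.strip line]
          else []) := by
      unfold pvCandA
      by_cases ht : PySem.Str.isIn "~~~" line = true
      · by_cases hp : 0 < pre.length
        · have hs : pre.getLast?.isSome = true := by
            rw [List.getLast?_isSome]
            intro hnil
            rw [hnil] at hp
            simp at hp
          rw [hget hp]
          simp_all
        · have hpre : pre = [] := List.eq_nil_of_length_eq_zero (by omega)
          subst hpre
          by_cases hsw : PySem.Str.startswith (PySem.Str.strip line) "self.assert" = true <;>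
            simp_all
      · by_cases hsw : PySem.Str.startswith (PySem.Str.strip line) "self.assert" = true <;>
          simp_all
    rw [hrest]
    cases hc : pvCandA (pre ++ line :: rest) ((pre.length : Int), line) with
    | none =>
      simp only [hc] at key ⊢
      rw [← key]
      simp
    | some c =>
      simp only [hc] at key ⊢
      rw [← key]
      simp

-- the error comprehension is the filterMap of pvCandE
theorem pvFilterMapCandE (l : List String) :
    l.filterMap pvCandE
      = (l.filter (fun x => !pvIsAssertionish x
          && pvErrorMarkers.any (fun m => PySem.Str.isIn m x))).map PySem.Str.strip := by
  induction l with
  | nil => rfl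
  | cons x l ih =>
    cases hb : (!pvIsAssertionish x && pvErrorMarkers.any (fun m => PySem.Str.isIn m x)) with
    | true =>
      have hx : pvCandE x = some (PySem.Str.strip x) := by unfold pvCandE; rw [hb]; simp
      rw [List.filterMap_cons, List.filter_cons, hx, ih, hb]
      simp
    | false =>
      have hx : pvCandE x = none := by unfold pvCandE; rw [hb]; simp
      rw [List.filterMap_cons, List.filter_cons, hx, ih, hb]
      simp

theorem pvFirstComp (l : List String) :
    (PySem.List.enumerate l 0).foldl (fun acc p => (pvCandA l p).getD acc) "" = pvLastAssertion l := by
  rw [pvFoldlKeepLast]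
  have h := pvEnumCandA l []
  simp only [List.length_nil, Int.natCast_zero, List.nil_append] at h
  rw [h]
  unfold pvLastAssertion
  rw [pvFoldB]
  simp only [List.nil_append]
  show (pvCandsFrom none l).getLast?.getD "" = _
  cases hc : (pvCandsFrom none l).getLast? <;> rfl

theorem pvSecondComp (l : List String) :
    (PySem.List.enumerate l 0).foldl (fun acc p => (pvCandE p.2).getD acc) "" = pvLastError l := by
  have hmap : (PySem.List.enumerate l 0).foldl (fun acc p => (pvCandE p.2).getD acc) ""
      = ((PySem.List.enumerate l 0).map Prod.snd).foldl (fun acc x => (pvCandE x).getD acc) "" := by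
    rw [List.foldl_map]
  rw [hmap, PySem.List.map_snd_enumerate, pvFoldlKeepLast, pvFilterMapCandE]
  unfold pvLastError
  cases hc : ((l.filter (fun x => !pvIsAssertionish x
      && pvErrorMarkers.any (fun m => PySem.Str.isIn m x))).map PySem.Str.strip).getLast? <;> rfl

-- A's combined loop computes B's two passes
theorem pvLoopEq (l : List String) :
    (PySem.List.enumerate l 0).foldl
      (fun (st : String × String) (p : Int × String) =>
        if PySem.Str.startswith (PySem.Str.strip p.2) "self.assert" || PySem.Str.isIn "~~~" p.2 then
          if PySem.Str.isIn "~~~" p.2 && decide (0 < p.1) then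
            (PySem.Str.strip ((PySem.List.pyGet? l (p.1 - 1)).getD ""), st.2)
          else if PySem.Str.startswith (PySem.Str.strip p.2) "self.assert" then
            (PySem.Str.strip p.2, st.2)
          else st
        else if pvMarkersA.any (fun m => PySem.Str.isIn m p.2) then
          (st.1, PySem.Str.strip p.2)
        else st)
      ("", "")
      = (pvLastAssertion l, pvLastError l) := by
  have hstep : (fun (st : String × String) (p : Int × String) =>
        if PySem.Str.startswith (PySem.Str.strip p.2) "self.assert" || PySem.Str.isIn "~~~" p.2 then
          if PySem.Str.isIn "~~~" p.2 && decide (0 < p.1) then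
            (PySem.Str.strip ((PySem.List.pyGet? l (p.1 - 1)).getD ""), st.2)
          else if PySem.Str.startswith (PySem.Str.strip p.2) "self.assert" then
            (PySem.Str.strip p.2, st.2)
          else st
        else if pvMarkersA.any (fun m => PySem.Str.isIn m p.2) then
          (st.1, PySem.Str.strip p.2)
        else st)
      = (fun (st : String × String) (p : Int × String) =>
          ((pvCandA l p).getD st.1, (pvCandE p.2).getD st.2)) := by
    funext st p
    unfold pvCandA pvCandE pvIsAssertionish pvErrorMarkers pvMarkersA
    split_ifs <;> simp_all
  rw [hstep]
  rw [PySem.List.foldl_prod_mk (f := fun acc p => (pvCandA l p).getD acc)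
    (g := fun acc p => (pvCandE p.2).getD acc)]
  rw [pvFirstComp, pvSecondComp]

-- ===== VERDICT (by name: the statement is the Claim_ definition above) =====
theorem clean_error_details_py_spec : Claim_equal_clean_error_details_py := by
  unfold Claim_equal_clean_error_details_py
  intro raw _
  unfold Spec_clean_error_details_py clean_error_details_py clean_error_details_py_alt
  by_cases h : (raw == "") = true
  · simp [h]
  · simp only [h, Bool.false_eq_true, if_false, pvLoopEq]
    set a := pvLastAssertion ((PySem.Str.split? (PySem.Str.strip raw) "\n").getD []) with ha'
    set e := pvLastError ((PySem.Str.split? (PySem.Str.strip raw) "\n").getD []) with he'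
    clear_value a e
    clear ha' he'
    rcases eq_or_ne a "" with ha | ha <;> rcases eq_or_ne e "" with he | he
    · simp [ha, he, List.filter]
    · have hb : (e != "") = true := by simp [bne_iff_ne, he]
      simp [ha, hb, List.filter]
    · have hb : (a != "") = true := by simp [bne_iff_ne, ha]
      simp [he, hb, List.filter]
    · have hb1 : (a != "") = true := by simp [bne_iff_ne, ha]
      have hb2 : (e != "") = true := by simp [bne_iff_ne, he]
      simp [hb1, hb2, List.filter]
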